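-- pv_equiv track=rewrite | github.com/aai-institute/pyDVL | src/pydvl/influence/general.py | _get_chunk_indices
-- ===== SOURCE A (Python) =====
-- from itertools import groupby
-- from typing import Any, Callable, Dict, Generator, Optional, Tuple, Type, Union
--
-- def _get_chunk_indices(
--     chunk_sizes: Tuple[int, ...], aggregate_same_chunk_size: bool = False
-- ) -> Tuple[Tuple[int, int], ...]:
--     indices = []
--     start = 0
--
--     if aggregate_same_chunk_size:
--         for value, group in groupby(chunk_sizes):
--             length = sum(group)
--             indices.append((start, start + length))
--             start += length
--     else:
--         for value in chunk_sizes: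
--             indices.append((start, start + value))
--             start += value
--
--     return tuple(indices)
-- ===== SOURCE B (Python) =====
-- from itertools import groupby
--
-- def _intervals(lengths):
--     if not lengths:
--         return []
--     if len(lengths) == 1:
--         return [(0, lengths[0])]
--     mid = len(lengths) // 2
--     left = _intervals(lengths[:mid])
--     right = _intervals(lengths[mid:])
--     shift = sum(lengths[:mid])
--     return left + [(a + shift, b + shift) for a, b in right]
--
-- def _get_chunk_indices(chunk_sizes, aggregate_same_chunk_size=False):
--     if aggregate_same_chunk_size:
--         lengths = [sum(g) for _, g in groupby(chunk_sizes)]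
--     else:
--         lengths = list(chunk_sizes)
--     return tuple(_intervals(lengths))
-- ===== Notes on version B (the rewrite author's own statement) =====
-- stated objective: alternative
-- what changed: Replaces the stateful left-to-right running-start loop with a divide-and-conquer recursion: intervals of each half are computed independently (each based at 0) and the right half's intervals are shifted by the left half's total; no accumulator is carried across elements.
import Mathlib
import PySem

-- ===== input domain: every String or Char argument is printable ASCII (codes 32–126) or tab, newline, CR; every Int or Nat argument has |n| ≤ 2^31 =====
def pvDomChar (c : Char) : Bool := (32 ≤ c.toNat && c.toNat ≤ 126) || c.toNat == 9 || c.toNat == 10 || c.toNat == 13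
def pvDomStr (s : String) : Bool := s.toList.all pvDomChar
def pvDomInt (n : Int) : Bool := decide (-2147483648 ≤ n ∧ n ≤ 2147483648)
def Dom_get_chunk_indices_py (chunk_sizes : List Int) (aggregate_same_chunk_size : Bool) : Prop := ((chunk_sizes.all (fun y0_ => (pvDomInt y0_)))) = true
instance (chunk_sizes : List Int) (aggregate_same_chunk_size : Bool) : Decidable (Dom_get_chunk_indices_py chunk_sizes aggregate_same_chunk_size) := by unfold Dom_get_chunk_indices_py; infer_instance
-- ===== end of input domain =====

-- ===== PORT A =====
-- B replaces the running-start accumulation by a divide-and-conquer recursion (halves computed independently, right half shifted); alternative decomposition.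

-- helper for itertools.groupby over a list of ints: splits into maximal runs of equal elements
def pvTakeRun (v : Int) : List Int → List Int × List Int
  | [] => ([], [])
  | x :: xs => if x = v then
      let p := pvTakeRun v xs
      (x :: p.1, p.2)
    else ([], x :: xs)

theorem pvTakeRun_rest_le (v : Int) (xs : List Int) : (pvTakeRun v xs).2.length ≤ xs.length := by
  induction xs with
  | nil => simp [pvTakeRun]
  | cons x xs ih =>
    simp only [pvTakeRun]
    split
    · exact Nat.le_succ_of_le ih
    · simp

def pvGroupby : List Int → List (List Int)
  | [] => []
  | x :: xs =>
    (x :: (pvTakeRun x xs).1) :: pvGroupby (pvTakeRun x xs).2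
termination_by xs => xs.length
decreasing_by
  simp only [List.length_cons]
  exact Nat.lt_succ_of_le (pvTakeRun_rest_le x xs)

-- A's aggregate branch: loop over the groups with a running start
def pvAggLoop (start : Int) : List (List Int) → List (Int × Int)
  | [] => []
  | g :: gs => (start, start + g.sum) :: pvAggLoop (start + g.sum) gs

-- A's plain branch: loop over chunk_sizes with a running start
def pvPlainLoop (start : Int) : List Int → List (Int × Int)
  | [] => []
  | v :: vs => (start, start + v) :: pvPlainLoop (start + v) vs

def get_chunk_indices_py (chunk_sizes : List Int) (aggregate_same_chunk_size : Bool) : List (Int × Int) :=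
  if aggregate_same_chunk_size then pvAggLoop 0 (pvGroupby chunk_sizes)
  else pvPlainLoop 0 chunk_sizes

-- ===== PORT B =====
-- B: divide and conquer — intervals of each half computed independently, right half shifted by the left half's total
def pvIntervals : List Int → List (Int × Int)
  | [] => []
  | [l] => [(0, l)]
  | l1 :: l2 :: rest =>
    let ls := l1 :: l2 :: rest
    let mid := ls.length / 2
    let left := pvIntervals (ls.take mid)
    let right := pvIntervals (ls.drop mid)
    let shift := (ls.take mid).sum
    left ++ right.map (fun p => (p.1 + shift, p.2 + shift))
termination_by ls => ls.length
decreasing_by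
  all_goals simp [List.length_take, List.length_drop]
  all_goals omega

def get_chunk_indices_py_alt (chunk_sizes : List Int) (aggregate_same_chunk_size : Bool) : List (Int × Int) :=
  let lengths := if aggregate_same_chunk_size then (pvGroupby chunk_sizes).map List.sum else chunk_sizes
  pvIntervals lengths

-- ===== PRECONDITION & SPEC =====
def Spec_get_chunk_indices_py (chunk_sizes : List Int) (aggregate_same_chunk_size : Bool) (out : List (Int × Int)) : Prop := out = get_chunk_indices_py_alt chunk_sizes aggregate_same_chunk_size
instance (chunk_sizes : List Int) (aggregate_same_chunk_size : Bool) (out : List (Int × Int)) : Decidable (Spec_get_chunk_indices_py chunk_sizes aggregate_same_chunk_size out) := by unfold Spec_get_chunk_indices_py; infer_instance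

-- ===== CLAIM (what is proved, stated in full; the proofs are below) =====
def Claim_equal_get_chunk_indices_py : Prop := ∀ (chunk_sizes : List Int) (aggregate_same_chunk_size : Bool), Dom_get_chunk_indices_py chunk_sizes aggregate_same_chunk_size → Spec_get_chunk_indices_py chunk_sizes aggregate_same_chunk_size (get_chunk_indices_py chunk_sizes aggregate_same_chunk_size)

-- ===== LEMMAS AND PROOFS =====

-- the running-start loop splits over append, the second part starting at the first part's total
theorem pvPlainLoop_append (xs ys : List Int) (s : Int) :
    pvPlainLoop s (xs ++ ys) = pvPlainLoop s xs ++ pvPlainLoop (s + xs.sum) ys := by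
  induction xs generalizing s with
  | nil => simp [pvPlainLoop]
  | cons x xs ih => simp [pvPlainLoop, ih, add_assoc]

-- shifting the start shifts every interval
theorem pvPlainLoop_shift (ls : List Int) (t : Int) :
    pvPlainLoop t ls = (pvPlainLoop 0 ls).map (fun p => (p.1 + t, p.2 + t)) := by
  induction ls generalizing t with
  | nil => simp [pvPlainLoop]
  | cons l ls ih =>
    simp only [pvPlainLoop, List.map_cons]
    rw [ih (t + l), ih (0 + l)]
    simp [List.map_map, Function.comp_def, add_comm, add_left_comm]

-- the divide-and-conquer recursion computes the running-start loop from 0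
theorem pvIntervals_eq_plain (ls : List Int) : pvIntervals ls = pvPlainLoop 0 ls := by
  induction ls using pvIntervals.induct with
  | case1 => simp [pvIntervals, pvPlainLoop]
  | case2 l => simp [pvIntervals, pvPlainLoop]
  | case3 l1 l2 rest ls mid ihl ihr =>
    rw [pvIntervals]

    rw [ihl, ihr, ← pvPlainLoop_shift,
      ← zero_add (((l1 :: l2 :: rest).take ((l1 :: l2 :: rest).length / 2)).sum),
      ← pvPlainLoop_append, List.take_append_drop]

-- the aggregate loop over groups is the plain loop over group sums
theorem pvAggLoop_eq_plain (gs : List (List Int)) (s : Int) :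
    pvAggLoop s gs = pvPlainLoop s (gs.map List.sum) := by
  induction gs generalizing s with
  | nil => rfl
  | cons g gs ih => simp [pvAggLoop, pvPlainLoop, ih]

-- ===== VERDICT (by name: the statement is the Claim_ definition above) =====
theorem get_chunk_indices_py_spec : Claim_equal_get_chunk_indices_py := by
  intro cs ag _
  unfold Spec_get_chunk_indices_py get_chunk_indices_py get_chunk_indices_py_alt
  cases ag with
  | false => simp [pvIntervals_eq_plain]
  | true => simp [pvAggLoop_eq_plain, pvIntervals_eq_plain]
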